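-- pv_equiv track=rewrite | github.com/lschoe/mpyc | mpyc/gf2x.py | _is_irreducible
-- ===== SOURCE A (Python) =====
-- def _mul(a, b):
--     if a < b:
--         a, b = b, a
--     # a >= b
--     c = 0
--     while b:
--         if b & 1:
--             c ^= a
--         a <<= 1
--         b >>= 1
--     return c
--
-- def _mod(a, b):
--     if b is None: # see _powmod()
--         return a
--     if b == 0:
--         raise ZeroDivisionError('division by zero polynomial')
--     m = _degree(a)
--     n = _degree(b)
--     if m < n:
--         return a
--     b <<= m - n
--     for i in range(m - n + 1):
--         if (a >> m - i) & 1: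
--             a ^= b
--         b >>= 1
--     return a
--
-- def _gcd(a, b):
--     while b:
--         a, b = b, _mod(a, b)
--     return a
--
-- def _degree(a):
--     return a.bit_length() - 1
--
-- def _is_irreducible(a):
--     if a <= 1:
--         return False
--     b = 2
--     for _ in range(_degree(a) // 2):
--         b = _mul(b, b)
--         b = _mod(b, a)
--         if _gcd(b ^ 2, a) != 1:
--             return False
--     return True
-- ===== SOURCE B (Python) =====
-- # Alternative implementation: squaring by bit-spreading (interleave zero bits) instead of a
-- # generic carry-less multiply, modular reduction by repeated top-bit alignment (recomputing the
-- # degree and skipping zero bits) instead of the fixed (m-n+1)-step schoolbook loop, and a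
-- # recursive Euclidean gcd/check instead of while/for loops.
--
-- def _sqr(b):
--     # square of a GF(2) polynomial: spread the bits apart (x^i -> x^(2i))
--     c, s = 0, 0
--     while b:
--         if b & 1:
--             c ^= 1 << s
--         b >>= 1
--         s += 2
--     return c
--
-- def _mod2(a, b):
--     # reduce a mod b (b != 0) by aligning b's leading term with a's leading term
--     nb = b.bit_length()
--     while a.bit_length() >= nb:
--         a ^= b << (a.bit_length() - nb)
--     return a
--
-- def _gcd2(a, b):
--     return a if b == 0 else _gcd2(b, _mod2(a, b))
--
-- def _check(a, b, k):
--     if k == 0: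
--         return True
--     b = _mod2(_sqr(b), a)
--     return _gcd2(b ^ 2, a) == 1 and _check(a, b, k - 1)
--
-- def _is_irreducible(a):
--     return a > 1 and _check(a, 2, (a.bit_length() - 1) // 2)
-- ===== Notes on version B (the rewrite author's own statement) =====
-- stated objective: alternative
-- what changed: Squaring is done by spreading bits apart (x^i -> x^(2i)) instead of A's generic shift-and-xor carry-less multiply, modular reduction repeatedly aligns the divisor with the current leading term (recomputing the degree and skipping zero coefficients) instead of A's fixed (m-n+1)-step schoolbook loop, and the gcd/main loop are recursive instead of while/for loops.
import Mathlib
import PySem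

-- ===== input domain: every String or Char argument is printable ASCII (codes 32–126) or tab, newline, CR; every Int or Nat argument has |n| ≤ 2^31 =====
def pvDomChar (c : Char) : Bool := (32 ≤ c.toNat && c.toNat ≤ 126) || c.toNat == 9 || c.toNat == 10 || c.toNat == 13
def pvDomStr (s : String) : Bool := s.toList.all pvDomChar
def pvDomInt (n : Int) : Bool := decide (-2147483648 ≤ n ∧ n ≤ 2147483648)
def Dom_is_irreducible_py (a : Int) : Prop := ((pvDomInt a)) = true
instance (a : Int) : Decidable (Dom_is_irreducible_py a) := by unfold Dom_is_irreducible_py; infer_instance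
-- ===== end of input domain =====

-- B replaces A's generic carry-less multiply / fixed-step reduction / while-loops by bit-spread
-- squaring, top-bit-aligned reduction and recursion (objective: alternative, same cost).
-- All arithmetic in _is_irreducible happens on nonnegative ints (a ≥ 2 after the `a <= 1` guard,
-- and ^ << >> & keep nonnegative operands nonnegative), so both ports work over Nat after the
-- guard; this is exact on every input the entry function reaches.

-- ===== PORT A =====

-- Python's n.bit_length() for n ≥ 0 (used by _degree(a) = a.bit_length() - 1).
def blN (n : Nat) : Nat := PySem.Int.bitLength (n : Int)

-- body of _mul's `while b:` loop
def mulALoop (a b c : Nat) : Nat :=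
  if _h : b = 0 then c
  else mulALoop (a <<< 1) (b >>> 1) (if b &&& 1 = 1 then c ^^^ a else c)
termination_by b
decreasing_by simp only [Nat.shiftRight_one]; omega

def mulA (a b : Nat) : Nat :=
  if a < b then mulALoop b a 0 else mulALoop a b 0

-- _mod's `for i in range(m - n + 1):` loop; p is the current bit position m - i
def modALoop : Nat → Nat → Nat → Nat → Nat
  | 0, _, a, _ => a
  | cnt+1, p, a, b =>
      modALoop cnt (p - 1) (if (a >>> p) &&& 1 = 1 then a ^^^ b else a) (b >>> 1)

-- _mod (the `b is None` branch is unused by _is_irreducible and not ported).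
-- Python raises ZeroDivisionError for b == 0; that branch is never reached from the entry
-- function, the port returns 0 there.  Degrees are compared via bit lengths:
-- m < n  ⟺  a.bit_length() < b.bit_length().
def modA (a b : Nat) : Nat :=
  if b = 0 then 0
  else if blN a < blN b then a
  else modALoop (blN a - blN b + 1) (blN a - 1) a (b <<< (blN a - blN b))

-- _gcd's `while b:` loop.  The fuel b bounds the number of iterations: each step replaces b by
-- _mod(a, b) < b (the remainder has smaller degree), so fuel b is never exhausted.
def gcdGoA : Nat → Nat → Nat → Nat
  | 0, a, _ => a
  | f+1, a, b => if b = 0 then a else gcdGoA f b (modA a b)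

def gcdA (a b : Nat) : Nat := gcdGoA b a b

-- `for _ in range(_degree(a) // 2):` with early `return False`, counting down
def benOrA : Nat → Nat → Nat → Bool
  | 0, _, _ => true
  | k+1, b, a =>
      let b1 := mulA b b
      let b2 := modA b1 a
      if gcdA (b2 ^^^ 2) a ≠ 1 then false else benOrA k b2 a

def is_irreducible_py (a : Int) : Bool :=
  if a ≤ 1 then false
  else benOrA ((PySem.Int.bitLength a - 1) / 2) 2 a.toNat

-- ===== PORT B =====

-- _sqr's `while b:` loop
def sqrLoop (b c s : Nat) : Nat :=
  if _h : b = 0 then c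
  else sqrLoop (b >>> 1) (if b &&& 1 = 1 then c ^^^ (1 <<< s) else c) (s + 2)
termination_by b
decreasing_by simp only [Nat.shiftRight_one]; omega

def sqrB (b : Nat) : Nat := sqrLoop b 0 0

-- Termination of _mod2's while loop: xoring in the aligned b cancels a's leading bit.
theorem modB_dec (a b : Nat) (hb : b ≠ 0) (h : blN b ≤ blN a) :
    blN (a ^^^ (b <<< (blN a - blN b))) < blN a := by
  have hbl : (b : Int).natAbs < 2 ^ blN b := PySem.Int.lt_two_pow_bitLength (b : Int)
  have hbg : 2 ^ (blN b - 1) ≤ (b : Int).natAbs :=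
    PySem.Int.two_pow_bitLength_le (b : Int) (by exact_mod_cast hb)
  simp only [Int.natAbs_natCast] at hbl hbg
  have hbp : 1 ≤ blN b := by
    by_contra hc
    have h0 : blN b = 0 := by omega
    rw [h0] at hbl; omega
  have hap : 1 ≤ blN a := le_trans hbp h
  have ha0 : a ≠ 0 := by
    intro h0
    have : blN a = 0 := by simp [h0, blN]
    omega
  have hal : (a : Int).natAbs < 2 ^ blN a := PySem.Int.lt_two_pow_bitLength (a : Int)
  have hag : 2 ^ (blN a - 1) ≤ (a : Int).natAbs :=
    PySem.Int.two_pow_bitLength_le (a : Int) (by exact_mod_cast ha0)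
  simp only [Int.natAbs_natCast] at hal hag
  set m := blN a with hm
  set n := blN b with hn
  set p := m - 1 with hp
  have hmp : m = p + 1 := by omega
  have hpow : 2 ^ m = 2 ^ (p + 1) := by rw [hmp]
  have hpow2 : 2 ^ (p + 1) = 2 * 2 ^ p := by rw [pow_succ]; omega
  -- the shifted b occupies exactly the window [2^p, 2^(p+1))
  have hs : b <<< (m - n) = b * 2 ^ (m - n) := Nat.shiftLeft_eq b (m - n)
  have hs1 : 2 ^ p ≤ b * 2 ^ (m - n) := by
    calc 2 ^ p = 2 ^ (n - 1) * 2 ^ (m - n) := by rw [← pow_add]; congr 1; omega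
    _ ≤ b * 2 ^ (m - n) := Nat.mul_le_mul_right _ hbg
  have hs2 : b * 2 ^ (m - n) < 2 ^ (p + 1) := by
    calc b * 2 ^ (m - n) < 2 ^ n * 2 ^ (m - n) := by
          exact (Nat.mul_lt_mul_right (Nat.two_pow_pos _)).2 hbl
    _ = 2 ^ (p + 1) := by rw [← pow_add]; congr 1; omega
  -- both operands of the xor have top bit p, so it cancels
  have hxlt : a ^^^ b * 2 ^ (m - n) < 2 ^ (p + 1) :=
    Nat.xor_lt_two_pow (by omega) hs2
  have hta : a.testBit p = true := by
    rw [Nat.testBit_eq_decide_div_mod_eq]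
    have : a / 2 ^ p = 1 := Nat.div_eq_of_lt_le (by omega) (by omega)
    simp [this]
  have htb : (b * 2 ^ (m - n)).testBit p = true := by
    rw [Nat.testBit_eq_decide_div_mod_eq]
    have : b * 2 ^ (m - n) / 2 ^ p = 1 := Nat.div_eq_of_lt_le (by omega) (by omega)
    simp [this]
  have htx : (a ^^^ b * 2 ^ (m - n)).testBit p = false := by
    rw [Nat.testBit_xor, hta, htb]; rfl
  have hxp : a ^^^ b * 2 ^ (m - n) < 2 ^ p := by
    rw [Nat.testBit_eq_decide_div_mod_eq, decide_eq_false_iff_not] at htx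
    have hd : (a ^^^ b * 2 ^ (m - n)) / 2 ^ p < 2 := by
      apply Nat.div_lt_of_lt_mul
      omega
    have h0 : (a ^^^ b * 2 ^ (m - n)) / 2 ^ p = 0 := by
      generalize (a ^^^ b * 2 ^ (m - n)) / 2 ^ p = q at htx hd
      omega
    have hdm := Nat.div_add_mod (a ^^^ b * 2 ^ (m - n)) (2 ^ p)
    have hml : (a ^^^ b * 2 ^ (m - n)) % 2 ^ p < 2 ^ p := Nat.mod_lt _ (Nat.two_pow_pos p)
    rw [h0, Nat.mul_zero, Nat.zero_add] at hdm
    omega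
  -- hence the bit length drops
  rw [hs]
  by_contra hc
  have hc' : blN a ≤ blN (a ^^^ b * 2 ^ (m - n)) := by omega
  have hx0 : a ^^^ b * 2 ^ (m - n) ≠ 0 ∨ a ^^^ b * 2 ^ (m - n) = 0 := by tauto
  rcases hx0 with hx0 | hx0
  · have hg : 2 ^ (blN (a ^^^ b * 2 ^ (m - n)) - 1) ≤ (((a ^^^ b * 2 ^ (m - n)) : Nat) : Int).natAbs :=
      PySem.Int.two_pow_bitLength_le _ (by exact_mod_cast hx0)
    simp only [Int.natAbs_natCast] at hg
    have : 2 ^ p ≤ 2 ^ (blN (a ^^^ b * 2 ^ (m - n)) - 1) :=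
      Nat.pow_le_pow_right (by omega) (by omega)
    omega
  · rw [hx0] at hc
    have : blN 0 = 0 := by simp [blN]
    omega

-- _mod2's `while a.bit_length() >= nb:` loop.  The extra `b ≠ 0` conjunct only makes the
-- recursion total: Python B never calls _mod2 with b == 0 (there the loop would not terminate).
def modB (a b : Nat) : Nat :=
  if h : blN b ≤ blN a ∧ b ≠ 0 then modB (a ^^^ (b <<< (blN a - blN b))) b else a
termination_by blN a
decreasing_by exact modB_dec a b h.2 h.1

-- _gcd2, with the same iteration-count fuel as the A side
def gcdGoB : Nat → Nat → Nat → Nat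
  | 0, a, _ => a
  | f+1, a, b => if b = 0 then a else gcdGoB f b (modB a b)

def gcdB (a b : Nat) : Nat := gcdGoB b a b

-- _check(a, b, k)
def checkB (a b : Nat) : Nat → Bool
  | 0 => true
  | k+1 =>
      let b2 := modB (sqrB b) a
      (gcdB (b2 ^^^ 2) a == 1) && checkB a b2 k

def is_irreducible_py_alt (a : Int) : Bool :=
  decide (1 < a) && checkB a.toNat 2 ((PySem.Int.bitLength a - 1) / 2)

-- ===== PRECONDITION & SPEC =====
def Spec_is_irreducible_py (a : Int) (out : Bool) : Prop := out = is_irreducible_py_alt a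
instance (a : Int) (out : Bool) : Decidable (Spec_is_irreducible_py a out) := by unfold Spec_is_irreducible_py; infer_instance

-- ===== CLAIM (what is proved, stated in full; the proofs are below) =====
def Claim_equal_is_irreducible_py : Prop := ∀ (a : Int), Dom_is_irreducible_py a → Spec_is_irreducible_py a (is_irreducible_py a)

-- ===== LEMMAS AND PROOFS =====

-- ---- basic facts about bit length ----

lemma blN_zero : blN 0 = 0 := by simp [blN]

lemma blN_lt (n : Nat) : n < 2 ^ blN n := by
  have := PySem.Int.lt_two_pow_bitLength (n : Int)
  simpa [blN] using this

lemma blN_ge (n : Nat) (h : n ≠ 0) : 2 ^ (blN n - 1) ≤ n := by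
  have := PySem.Int.two_pow_bitLength_le (n : Int) (by exact_mod_cast h)
  simpa [blN] using this

lemma blN_le_of_lt {n k : Nat} (h : n < 2 ^ k) : blN n ≤ k := by
  rcases eq_or_ne n 0 with h0 | h0
  · simp [h0, blN_zero]
  · by_contra hc
    have h1 := blN_ge n h0
    have : 2 ^ k ≤ 2 ^ (blN n - 1) := Nat.pow_le_pow_right (by omega) (by omega)
    omega

lemma blN_pos {n : Nat} (h : n ≠ 0) : 1 ≤ blN n := by
  by_contra hc
  have h0 : blN n = 0 := by omega
  have := blN_lt n
  rw [h0] at this; omega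

lemma blN_eq {n p : Nat} (h1 : 2 ^ p ≤ n) (h2 : n < 2 ^ (p + 1)) : blN n = p + 1 := by
  have hle := blN_le_of_lt h2
  have h0 : n ≠ 0 := by have := Nat.two_pow_pos p; omega
  have hg := blN_ge n h0
  by_contra hc
  have hlt : blN n ≤ p := by omega
  have hmono : 2 ^ blN n ≤ 2 ^ p := Nat.pow_le_pow_right (by omega) hlt
  have := blN_lt n
  omega

lemma blN_shift {b : Nat} (hb : b ≠ 0) (k : Nat) : blN (b <<< k) = blN b + k := by
  rw [Nat.shiftLeft_eq]
  have h1 := blN_ge b hb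
  have h2 := blN_lt b
  have hp := blN_pos hb
  have : blN (b * 2 ^ k) = (blN b - 1 + k) + 1 := by
    apply blN_eq
    · calc 2 ^ (blN b - 1 + k) = 2 ^ (blN b - 1) * 2 ^ k := by rw [pow_add]
      _ ≤ b * 2 ^ k := Nat.mul_le_mul_right _ h1
    · calc b * 2 ^ k < 2 ^ blN b * 2 ^ k := (Nat.mul_lt_mul_right (Nat.two_pow_pos _)).2 h2
      _ = 2 ^ (blN b - 1 + k + 1) := by rw [← pow_add]; congr 1; omega
  omega

-- ---- top-bit facts ----

lemma topSet_ge {a p : Nat} (h : a / 2 ^ p % 2 = 1) : 2 ^ p ≤ a := by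
  by_contra hc
  have : a / 2 ^ p = 0 := Nat.div_eq_of_lt (by omega)
  omega

lemma topClear_lt {a p : Nat} (h1 : a < 2 ^ (p + 1)) (h2 : a / 2 ^ p % 2 = 0) : a < 2 ^ p := by
  have hps : (2 : Nat) ^ (p + 1) = 2 * 2 ^ p := by rw [pow_succ]; omega
  have hd : a / 2 ^ p < 2 := by
    apply Nat.div_lt_of_lt_mul
    omega
  have h0 : a / 2 ^ p = 0 := by
    generalize a / 2 ^ p = q at h2 hd
    omega
  have hdm := Nat.div_add_mod a (2 ^ p)
  have hml : a % 2 ^ p < 2 ^ p := Nat.mod_lt a (Nat.two_pow_pos p)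
  rw [h0, Nat.mul_zero, Nat.zero_add] at hdm
  omega

lemma xor_top_cancel {a b p : Nat} (ha1 : 2 ^ p ≤ a) (ha2 : a < 2 ^ (p + 1))
    (hb1 : 2 ^ p ≤ b) (hb2 : b < 2 ^ (p + 1)) : a ^^^ b < 2 ^ p := by
  have hx := Nat.xor_lt_two_pow ha2 hb2
  have hps : (2 : Nat) ^ (p + 1) = 2 * 2 ^ p := by rw [pow_succ]; omega
  have hta : a.testBit p = true := by
    rw [Nat.testBit_eq_decide_div_mod_eq]
    have : a / 2 ^ p = 1 := Nat.div_eq_of_lt_le (by omega) (by omega)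
    simp [this]
  have htb : b.testBit p = true := by
    rw [Nat.testBit_eq_decide_div_mod_eq]
    have : b / 2 ^ p = 1 := Nat.div_eq_of_lt_le (by omega) (by omega)
    simp [this]
  have htx : (a ^^^ b).testBit p = false := by rw [Nat.testBit_xor, hta, htb]; rfl
  rw [Nat.testBit_eq_decide_div_mod_eq, decide_eq_false_iff_not] at htx
  exact topClear_lt hx (by omega)

-- ---- carry-less multiplication: A's _mul(b, b) is B's _sqr(b) ----

-- specification of A's product loop
def clmul (a b : Nat) : Nat :=
  if _h : b = 0 then 0
  else (if b &&& 1 = 1 then a else 0) ^^^ clmul (2 * a) (b / 2)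
termination_by b
decreasing_by omega

-- specification of B's square loop
def Sq (a : Nat) : Nat :=
  if _h : a = 0 then 0 else (a % 2) ^^^ 4 * Sq (a / 2)
termination_by a
decreasing_by omega

lemma clmul_unfold (a b : Nat) (hb : b ≠ 0) :
    clmul a b = (if b &&& 1 = 1 then a else 0) ^^^ clmul (2 * a) (b / 2) := by
  conv_lhs => rw [clmul]
  rw [dif_neg hb]

lemma clmul_zero_right (a : Nat) : clmul a 0 = 0 := by
  rw [clmul]
  simp

lemma pow2_mul_xor (s x y : Nat) : 2 ^ s * (x ^^^ y) = 2 ^ s * x ^^^ 2 ^ s * y := by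
  have := Nat.shiftLeft_xor_distrib (a := x) (b := y) (i := s)
  simpa [Nat.shiftLeft_eq, Nat.mul_comm] using this

lemma two_mul_xor (x y : Nat) : 2 * (x ^^^ y) = 2 * x ^^^ 2 * y := by
  have := pow2_mul_xor 1 x y
  simpa using this

lemma modALoop_zero (p a b : Nat) : modALoop 0 p a b = a := rfl

lemma modALoop_succ (cnt p a b : Nat) :
    modALoop (cnt + 1) p a b =
      modALoop cnt (p - 1) (if (a >>> p) &&& 1 = 1 then a ^^^ b else a) (b >>> 1) := rfl

lemma xor_small {r k : Nat} (h : r < 2) : r ^^^ 2 * k = r + 2 * k := by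
  interval_cases r
  · simp
  · apply Nat.eq_of_testBit_eq
    intro i
    cases i with
    | zero =>
      simp [Nat.testBit_eq_decide_div_mod_eq]
    | succ j =>
      rw [Nat.testBit_xor, Nat.testBit_add_one, Nat.testBit_add_one, Nat.testBit_add_one]
      have h1 : (1 : Nat) / 2 = 0 := by omega
      have h2 : 2 * k / 2 = k := by omega
      have h3 : (1 + 2 * k) / 2 = k := by omega
      rw [h1, h2, h3]
      simp [Nat.zero_testBit]

lemma mulALoop_eq (b : Nat) : ∀ a c, mulALoop a b c = c ^^^ clmul a b := by
  induction b using Nat.strong_induction_on with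
  | _ b ih =>
    intro a c
    rw [mulALoop, clmul]
    by_cases hb : b = 0
    · simp [hb]
    · rw [dif_neg hb, dif_neg hb]
      rw [ih (b >>> 1) (by simp only [Nat.shiftRight_one]; omega)]
      have hs : a <<< 1 = 2 * a := by rw [Nat.shiftLeft_eq]; omega
      have hr : b >>> 1 = b / 2 := Nat.shiftRight_one b
      rw [hs, hr]
      by_cases hodd : b &&& 1 = 1
      · rw [if_pos hodd, if_pos hodd, Nat.xor_assoc]
      · rw [if_neg hodd, if_neg hodd, Nat.zero_xor]

lemma clmul_zero_left (b : Nat) : clmul 0 b = 0 := by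
  induction b using Nat.strong_induction_on with
  | _ b ih =>
    rw [clmul]
    by_cases hb : b = 0
    · simp [hb]
    · rw [dif_neg hb]
      have h2 : (2 : Nat) * 0 = 0 := by omega
      rw [h2, ih (b / 2) (by omega)]
      simp

lemma clmul_two_left (b : Nat) : ∀ a, clmul (2 * a) b = 2 * clmul a b := by
  induction b using Nat.strong_induction_on with
  | _ b ih =>
    intro a
    by_cases hb : b = 0
    · simp [hb, clmul_zero_right]
    · rw [clmul_unfold (2 * a) b hb, clmul_unfold a b hb]
      rw [two_mul_xor, ih (b / 2) (by omega) (2 * a)]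
      by_cases hodd : b &&& 1 = 1
      · rw [if_pos hodd, if_pos hodd]
      · rw [if_neg hodd, if_neg hodd]

lemma clmul_one_left (b : Nat) : clmul 1 b = b := by
  induction b using Nat.strong_induction_on with
  | _ b ih =>
    by_cases hb : b = 0
    · simp [hb, clmul_zero_right]
    · rw [clmul_unfold 1 b hb]
      have h2 : (2 : Nat) * 1 = 2 * 1 := rfl
      rw [show (2 : Nat) * 1 = 2 * 1 from rfl, clmul_two_left, ih (b / 2) (by omega),
        Nat.and_one_is_mod]
      by_cases hodd : b % 2 = 1
      · rw [if_pos hodd, xor_small (by omega)]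
        omega
      · rw [if_neg hodd, Nat.zero_xor]
        omega

lemma clmul_distrib_left (b : Nat) : ∀ x y, clmul (x ^^^ y) b = clmul x b ^^^ clmul y b := by
  induction b using Nat.strong_induction_on with
  | _ b ih =>
    intro x y
    by_cases hb : b = 0
    · simp [hb, clmul_zero_right]
    · rw [clmul_unfold (x ^^^ y) b hb, clmul_unfold x b hb, clmul_unfold y b hb]
      rw [two_mul_xor, ih (b / 2) (by omega) (2 * x) (2 * y)]
      by_cases hodd : b &&& 1 = 1
      · rw [if_pos hodd, if_pos hodd, if_pos hodd]
        simp [Nat.xor_assoc, Nat.xor_comm, Nat.xor_left_comm]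
      · rw [if_neg hodd, if_neg hodd, if_neg hodd]
        simp [Nat.xor_assoc, Nat.xor_comm, Nat.xor_left_comm]

lemma clmul_self (a : Nat) : clmul a a = Sq a := by
  induction a using Nat.strong_induction_on with
  | _ a ih =>
    rw [Sq]
    by_cases ha : a = 0
    · rw [dif_pos ha, ha, clmul_zero_right]
    · rw [dif_neg ha, clmul_unfold a a ha, Nat.and_one_is_mod]
      obtain ⟨q, r, hr, hqr⟩ : ∃ q r, r < 2 ∧ a = 2 * q + r := ⟨a / 2, a % 2, by omega, by omega⟩
      have hq : a / 2 = q := by omega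
      have hrr : a % 2 = r := by omega
      have hsplit : a = r ^^^ 2 * q := by rw [xor_small hr]; omega
      have hd : clmul a q = clmul r q ^^^ 2 * clmul q q := by
        conv_lhs => rw [hsplit]
        rw [clmul_distrib_left, clmul_two_left]
      rw [hq, hrr, clmul_two_left q a, hd, two_mul_xor]
      have h4 : 2 * (2 * clmul q q) = 4 * clmul q q := by ring
      rw [h4, ih q (by omega)]
      interval_cases r
      · rw [if_neg (by omega), clmul_zero_left]
        simp
      · rw [if_pos rfl, clmul_one_left]
        conv_lhs => rw [hsplit]
        simp [Nat.xor_assoc, Nat.xor_comm, Nat.xor_left_comm, Nat.xor_self]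

lemma sqrLoop_eq (b : Nat) : ∀ c s, sqrLoop b c s = c ^^^ 2 ^ s * Sq b := by
  induction b using Nat.strong_induction_on with
  | _ b ih =>
    intro c s
    rw [sqrLoop, Sq]
    by_cases hb : b = 0
    · simp [hb]
    · rw [dif_neg hb, dif_neg hb]
      rw [ih (b >>> 1) (by simp only [Nat.shiftRight_one]; omega)]
      rw [Nat.shiftRight_one, Nat.and_one_is_mod]
      rw [pow2_mul_xor]
      have h42 : 2 ^ s * (4 * Sq (b / 2)) = 2 ^ (s + 2) * Sq (b / 2) := by
        rw [pow_add]
        ring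
      rw [h42]
      by_cases hodd : b % 2 = 1
      · rw [if_pos hodd, hodd]
        have h1s : 1 <<< s = 2 ^ s := by rw [Nat.shiftLeft_eq, Nat.one_mul]
        rw [h1s, Nat.mul_one, Nat.xor_assoc]
      · have hz : b % 2 = 0 := by omega
        rw [if_neg hodd, hz]
        simp

lemma mulA_self (b : Nat) : mulA b b = sqrB b := by
  rw [mulA, sqrB, if_neg (lt_irrefl b), mulALoop_eq, sqrLoop_eq, clmul_self]
  simp

-- ---- reduction: A's _mod equals B's _mod2 ----

lemma modALoop_eq_modB (k : Nat) :
    ∀ a b0, b0 ≠ 0 → a < 2 ^ (blN b0 + k) →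
      modALoop (k + 1) (blN b0 - 1 + k) a (b0 <<< k) = modB a b0 := by
  induction k with
  | zero =>
    intro a b0 hb0 ha
    have hn1 := blN_pos hb0
    have hb0l := blN_lt b0
    have hb0g := blN_ge b0 hb0
    rw [Nat.add_zero] at ha
    rw [Nat.shiftLeft_zero, Nat.add_zero]
    have hbr : (a >>> (blN b0 - 1)) &&& 1 = a / 2 ^ (blN b0 - 1) % 2 := by
      rw [Nat.shiftRight_eq_div_pow, Nat.and_one_is_mod]
    have hpow : (2 : Nat) ^ blN b0 = 2 ^ (blN b0 - 1 + 1) := by congr 1; omega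
    rw [modALoop_succ, modALoop_zero]
    simp only [Nat.add_zero, hbr]
    by_cases hbit : a / 2 ^ (blN b0 - 1) % 2 = 1
    · have hge : 2 ^ (blN b0 - 1) ≤ a := topSet_ge hbit
      have hlt : a < 2 ^ (blN b0 - 1 + 1) := by rw [← hpow]; omega
      have hba : blN a = blN b0 - 1 + 1 := blN_eq hge hlt
      rw [if_pos hbit, modB, dif_pos ⟨by omega, hb0⟩]
      have hsh : blN a - blN b0 = 0 := by omega
      rw [hsh, Nat.shiftLeft_zero]
      have hxlt : a ^^^ b0 < 2 ^ (blN b0 - 1) :=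
        xor_top_cancel hge hlt hb0g (by rw [← hpow]; omega)
      have hbx : blN (a ^^^ b0) < blN b0 := by
        have := blN_le_of_lt hxlt
        omega
      rw [modB, dif_neg (fun hcon => by omega)]
    · have hb0' : a / 2 ^ (blN b0 - 1) % 2 = 0 := by
        generalize a / 2 ^ (blN b0 - 1) = q at hbit
        omega
      have hlt' : a < 2 ^ (blN b0 - 1) := topClear_lt (by rw [← hpow]; omega) hb0'
      have hba : blN a ≤ blN b0 - 1 := blN_le_of_lt hlt'
      rw [if_neg hbit, modB, dif_neg (fun hcon => by omega)]
  | succ k ih =>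
    intro a b0 hb0 ha
    have hn1 := blN_pos hb0
    have hb0l := blN_lt b0
    have hb0g := blN_ge b0 hb0
    have hshiftne : b0 <<< (k + 1) ≠ 0 := by
      rw [Nat.shiftLeft_eq]
      exact Nat.mul_ne_zero hb0 (Nat.pos_iff_ne_zero.1 (Nat.two_pow_pos _))
    have hbls : blN (b0 <<< (k + 1)) = blN b0 + (k + 1) := blN_shift hb0 (k + 1)
    set p := blN b0 - 1 + (k + 1) with hp
    have hpa : blN b0 + (k + 1) = p + 1 := by omega
    have hpow : (2 : Nat) ^ (blN b0 + (k + 1)) = 2 ^ (p + 1) := by rw [hpa]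
    have hsdown : (b0 <<< (k + 1)) >>> 1 = b0 <<< k := by
      rw [Nat.shiftRight_one, Nat.shiftLeft_eq, Nat.shiftLeft_eq, pow_succ, ← Nat.mul_assoc,
        Nat.mul_div_cancel _ (by omega)]
    have hbr : (a >>> p) &&& 1 = a / 2 ^ p % 2 := by
      rw [Nat.shiftRight_eq_div_pow, Nat.and_one_is_mod]
    rw [modALoop_succ, hbr, hsdown]
    have hp1 : p - 1 = blN b0 - 1 + k := by omega
    rw [hp1]
    by_cases hbit : a / 2 ^ p % 2 = 1
    · have hge : 2 ^ p ≤ a := topSet_ge hbit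
      have hlt : a < 2 ^ (p + 1) := by rw [← hpow]; omega
      have hba : blN a = p + 1 := blN_eq hge hlt
      rw [if_pos hbit]
      have hbs_ge : 2 ^ p ≤ b0 <<< (k + 1) := by
        have hg := blN_ge _ hshiftne
        rw [hbls] at hg
        calc 2 ^ p = 2 ^ (blN b0 + (k + 1) - 1) := by congr 1; omega
        _ ≤ b0 <<< (k + 1) := hg
      have hbs_lt : b0 <<< (k + 1) < 2 ^ (p + 1) := by
        have hl := blN_lt (b0 <<< (k + 1))
        rw [hbls, hpa] at hl
        exact hl
      have hx : a ^^^ b0 <<< (k + 1) < 2 ^ p := xor_top_cancel hge hlt hbs_ge hbs_lt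
      rw [modB, dif_pos ⟨by omega, hb0⟩]
      have hsh : blN a - blN b0 = k + 1 := by omega
      rw [hsh]
      have hxlt : a ^^^ b0 <<< (k + 1) < 2 ^ (blN b0 + k) := by
        calc a ^^^ b0 <<< (k + 1) < 2 ^ p := hx
        _ ≤ 2 ^ (blN b0 + k) := Nat.pow_le_pow_right (by omega) (by omega)
      exact ih (a ^^^ b0 <<< (k + 1)) b0 hb0 hxlt
    · rw [if_neg hbit]
      have hb0' : a / 2 ^ p % 2 = 0 := by
        generalize a / 2 ^ p = q at hbit
        omega
      have hlt' : a < 2 ^ p := topClear_lt (by rw [← hpow]; omega) hb0'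
      have hxlt : a < 2 ^ (blN b0 + k) := by
        calc a < 2 ^ p := hlt'
        _ ≤ 2 ^ (blN b0 + k) := Nat.pow_le_pow_right (by omega) (by omega)
      exact ih a b0 hb0 hxlt

lemma modA_eq_modB (a b : Nat) (hb : b ≠ 0) : modA a b = modB a b := by
  rw [modA, if_neg hb]
  by_cases hlt : blN a < blN b
  · rw [if_pos hlt, modB, dif_neg (fun hcon => by omega)]
  · rw [if_neg hlt]
    have hble : blN b ≤ blN a := by omega
    have hbp := blN_pos hb
    have h1 : blN a - blN b + 1 = (blN a - blN b) + 1 := rfl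
    have h2 : blN a - 1 = blN b - 1 + (blN a - blN b) := by omega
    rw [h2]
    apply modALoop_eq_modB (blN a - blN b) a b hb
    have hl := blN_lt a
    have hpp : (2 : Nat) ^ blN a = 2 ^ (blN b + (blN a - blN b)) := by congr 1; omega
    omega

-- ---- gcd and the main loop ----

lemma gcdGo_eq (f : Nat) : ∀ a b, gcdGoA f a b = gcdGoB f a b := by
  induction f with
  | zero => intro a b; rfl
  | succ f ih =>
    intro a b
    show (if b = 0 then a else gcdGoA f b (modA a b)) =
         (if b = 0 then a else gcdGoB f b (modB a b))
    by_cases hb : b = 0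
    · rw [if_pos hb, if_pos hb]
    · rw [if_neg hb, if_neg hb, modA_eq_modB a b hb, ih]

lemma gcd_eq (a b : Nat) : gcdA a b = gcdB a b := gcdGo_eq b a b

lemma benOr_eq_check (k : Nat) : ∀ b a, a ≠ 0 → benOrA k b a = checkB a b k := by
  induction k with
  | zero => intro b a _; rfl
  | succ k ih =>
    intro b a ha
    have hA : benOrA (k + 1) b a =
        (if gcdA ((modA (mulA b b) a) ^^^ 2) a ≠ 1 then false
         else benOrA k (modA (mulA b b) a) a) := rfl
    have hB : checkB a b (k + 1) =
        ((gcdB ((modB (sqrB b) a) ^^^ 2) a == 1) && checkB a (modB (sqrB b) a) k) := rfl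
    rw [hA, hB, mulA_self, modA_eq_modB _ _ ha, gcd_eq]
    by_cases hg : gcdB ((modB (sqrB b) a) ^^^ 2) a = 1
    · simp [hg, ih (modB (sqrB b) a) a ha]
    · simp [hg]

-- ===== VERDICT (by name: the statement is the Claim_ definition above) =====
theorem is_irreducible_py_spec : Claim_equal_is_irreducible_py := by
  intro a _
  show is_irreducible_py a = is_irreducible_py_alt a
  rw [is_irreducible_py, is_irreducible_py_alt]
  by_cases h : a ≤ 1
  · rw [if_pos h]
    have hd : decide (1 < a) = false := by
      simp only [decide_eq_false_iff_not]
      omega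
    rw [hd, Bool.false_and]
  · rw [if_neg h]
    have hd : decide (1 < a) = true := by
      simp only [decide_eq_true_eq]
      omega
    rw [hd, Bool.true_and]
    exact benOr_eq_check _ 2 a.toNat (by omega)
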